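-- pv_equiv track=rewrite | github.com/SongJungHyun1004/codetree-TILs | 231216/독서실의 거리두기 2/study-cafe-keeping-distance-2.py | find_two_minmaxdist
-- ===== SOURCE A (Python) =====
-- def find_two_minmaxdist(study_room, flag):
--     s = study_room.find('1')
--     max_dist = 0
--     min_dist = len(study_room)
--     for i in range(s+1, len(study_room)):
--         if study_room[i] == '1':
--             dist = i - s
--             if max_dist < dist:
--                 max_dist = dist
--                 mx_x, mx_y = s, i
--             if min_dist > dist:
--                 min_dist = dist
--                 mn_x, mn_y = s, i
--             s = i
--     if flag == 'max':
--         return mx_x, mx_y, None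
--     else:
--         return mn_x, mn_y, min_dist
-- ===== SOURCE B (Python) =====
-- def find_two_minmaxdist(study_room, flag):
--     pos = [i for i, c in enumerate(study_room) if c == '1']
--     pairs = list(zip(pos, pos[1:]))
--     gaps = [b - a for a, b in pairs]
--     if flag == 'max':
--         x, y = pairs[gaps.index(max(gaps))]
--         return x, y, None
--     else:
--         m = min(gaps)
--         x, y = pairs[gaps.index(m)]
--         return x, y, m
-- ===== Notes on version B (the rewrite author's own statement) =====
-- stated objective: alternative
-- what changed: B replaces A's single stateful index scan (running prev-'1' index with strict running max/min and witness variables) by building the list of '1' positions, zipping it with itself to get consecutive pairs and gaps, and selecting the answer with max/min plus gaps.index (first occurrence, matching A's strict-update tie-breaking).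
-- outside the precondition, e.g. on find_two_minmaxdist('0100', 'max'): A raises UnboundLocalError, B raises ValueError; on find_two_minmaxdist('', 'min'): A raises UnboundLocalError, B raises ValueError
import Mathlib
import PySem

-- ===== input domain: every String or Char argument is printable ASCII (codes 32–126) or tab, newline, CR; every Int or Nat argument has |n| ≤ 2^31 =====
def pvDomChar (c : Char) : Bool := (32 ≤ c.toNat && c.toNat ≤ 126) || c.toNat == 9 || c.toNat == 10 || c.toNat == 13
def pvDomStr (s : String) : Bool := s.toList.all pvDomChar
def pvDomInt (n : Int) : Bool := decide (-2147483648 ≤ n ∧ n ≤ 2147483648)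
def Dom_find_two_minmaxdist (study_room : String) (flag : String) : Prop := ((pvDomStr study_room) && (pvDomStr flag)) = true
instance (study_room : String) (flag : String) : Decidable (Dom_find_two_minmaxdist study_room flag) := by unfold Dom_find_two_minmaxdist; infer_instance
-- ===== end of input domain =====

-- B replaces A's single stateful scan by building the '1'-position list, zipping consecutive
-- pairs and selecting with max/min + first index; equal on strings with ≥ 2 ones (objective: alternative).

-- ===== PORT A =====
-- A-side helper: the body of A's for-loop (one step of the scan over i), kept as a named helper.
def stepA (cs : List Char) (st : Int × Int × Int × Option (Int × Int) × Option (Int × Int))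
    (i : Int) : Int × Int × Int × Option (Int × Int) × Option (Int × Int) :=
  if PySem.List.pyGetD cs i ' ' = '1' then
    let s := st.1
    let dist := i - s
    let maxPair := if st.2.1 < dist then (dist, some (s, i)) else (st.2.1, st.2.2.2.1)
    let minPair := if st.2.2.1 > dist then (dist, some (s, i)) else (st.2.2.1, st.2.2.2.2)
    (i, maxPair.1, minPair.1, maxPair.2, minPair.2)
  else st

def find_two_minmaxdist (study_room : String) (flag : String) : Int × Int × Option Int :=
  let cs := study_room.toList
  let n : Int := (cs.length : Int)
  let s0 := PySem.Str.find study_room "1"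
  let st := (PySem.List.pyRange (s0 + 1) n 1).foldl (stepA cs) (s0, 0, n, none, none)
  if flag = "max" then
    match st.2.2.2.1 with
    | some (x, y) => (x, y, none)
    | none => (0, 0, none)   -- Python raises UnboundLocalError here; excluded by Pre_
  else
    match st.2.2.2.2 with
    | some (x, y) => (x, y, some st.2.2.1)
    | none => (0, 0, none)   -- Python raises UnboundLocalError here; excluded by Pre_

-- ===== PORT B =====
def find_two_minmaxdist_alt (study_room : String) (flag : String) : Int × Int × Option Int :=
  let pos : List Int :=
    ((PySem.List.enumerate study_room.toList 0).filter (fun p => p.2 == '1')).map (·.1)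
  let pairs := pos.zip (PySem.List.slice pos (some 1) none)
  let gaps := pairs.map (fun pr => pr.2 - pr.1)
  if flag = "max" then
    match PySem.List.max? gaps (fun g => g) with
    | some m =>
      match PySem.List.index? gaps m with
      | some j =>
        match pairs[j]? with
        | some (x, y) => (x, y, none)
        | none => (0, 0, none)
      | none => (0, 0, none)
    | none => (0, 0, none)   -- Python raises ValueError here; excluded by Pre_
  else
    match PySem.List.min? gaps (fun g => g) with
    | some m =>
      match PySem.List.index? gaps m with
      | some j =>
        match pairs[j]? with
        | some (x, y) => (x, y, some m)
        | none => (0, 0, none)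
      | none => (0, 0, none)
    | none => (0, 0, none)   -- Python raises ValueError here; excluded by Pre_

-- ===== PRECONDITION & SPEC =====
-- Pre_ excludes strings with fewer than two '1' characters, on which both A and B raise
-- (A: UnboundLocalError, B: ValueError from max()/min() of an empty sequence).
def Pre_find_two_minmaxdist (study_room : String) (flag : String) : Prop :=
  2 ≤ (study_room.toList.filter (fun c => c == '1')).length
instance (study_room : String) (flag : String) : Decidable (Pre_find_two_minmaxdist study_room flag) := by
  unfold Pre_find_two_minmaxdist; infer_instance

def pvWitness_find_two_minmaxdist : String × String := ("0101", "max")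

def Spec_find_two_minmaxdist (study_room : String) (flag : String) (out : Int × Int × Option Int) : Prop := out = find_two_minmaxdist_alt study_room flag
instance (study_room : String) (flag : String) (out : Int × Int × Option Int) : Decidable (Spec_find_two_minmaxdist study_room flag out) := by unfold Spec_find_two_minmaxdist; infer_instance

-- ===== CLAIM (what is proved, stated in full; the proofs are below) =====
def Claim_equal_find_two_minmaxdist : Prop := ∀ (study_room : String) (flag : String), Dom_find_two_minmaxdist study_room flag → Pre_find_two_minmaxdist study_room flag → Spec_find_two_minmaxdist study_room flag (find_two_minmaxdist study_room flag)

-- ===== LEMMAS AND PROOFS =====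

-- positions of '1' in cs (exactly B's `pos`)
def onesPos (cs : List Char) : List Int :=
  ((PySem.List.enumerate cs 0).filter (fun p => p.2 == '1')).map (·.1)

def gapOf (pr : Int × Int) : Int := pr.2 - pr.1

-- the unconditional body of stepA (taken when cs[i] = '1')
def stepCore (st : Int × Int × Int × Option (Int × Int) × Option (Int × Int))
    (i : Int) : Int × Int × Int × Option (Int × Int) × Option (Int × Int) :=
  let s := st.1
  let dist := i - s
  let maxPair := if st.2.1 < dist then (dist, some (s, i)) else (st.2.1, st.2.2.2.1)
  let minPair := if st.2.2.1 > dist then (dist, some (s, i)) else (st.2.2.1, st.2.2.2.2)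
  (i, maxPair.1, minPair.1, maxPair.2, minPair.2)

def runMax (prs : List (Int × Int)) (m : Int) (w : Option (Int × Int)) : Int × Option (Int × Int) :=
  prs.foldl (fun acc pr => if acc.1 < gapOf pr then (gapOf pr, some pr) else acc) (m, w)

def runMin (prs : List (Int × Int)) (m : Int) (w : Option (Int × Int)) : Int × Option (Int × Int) :=
  prs.foldl (fun acc pr => if acc.1 > gapOf pr then (gapOf pr, some pr) else acc) (m, w)

lemma onesPos_bounds (cs : List Char) (p : Int) (hp : p ∈ onesPos cs) :
    0 ≤ p ∧ p < (cs.length : Int) := by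
  simp only [onesPos, List.mem_map] at hp
  obtain ⟨q, hq, rfl⟩ := hp
  have hq' := List.mem_of_mem_filter hq
  rw [PySem.List.mem_enumerate_iff] at hq'
  obtain ⟨k, hk, rfl⟩ := hq'
  simp
  omega

lemma onesPos_char (cs : List Char) (p : Int) (hp : p ∈ onesPos cs) :
    PySem.List.pyGetD cs p ' ' = '1' := by
  simp only [onesPos, List.mem_map] at hp
  obtain ⟨q, hq, rfl⟩ := hp
  have hq1 := List.mem_of_mem_filter hq
  have hq2 := List.of_mem_filter hq
  rw [PySem.List.mem_enumerate_iff] at hq1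
  obtain ⟨k, hk, rfl⟩ := hq1
  simp only [beq_iff_eq] at hq2
  have : ((0 : Int) + (k : Int)) = ((k : Nat) : Int) := by omega
  rw [this, PySem.List.pyGetD_natCast, List.getD_eq_getElem?_getD, List.getElem?_eq_getElem hk]
  simpa using hq2

lemma onesPos_pairwise (cs : List Char) : (onesPos cs).Pairwise (· < ·) := by
  have h := PySem.List.pairwise_lt_enumerate (xs := cs) (s := 0)
  exact (h.filter _).map _ (fun a b hab => hab)

lemma onesPos_append (cs : List Char) (c : Char) :
    onesPos (cs ++ [c]) = onesPos cs ++ (if c == '1' then [(cs.length : Int)] else []) := by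
  by_cases hc : c == '1' <;>
    simp [onesPos, PySem.List.enumerate_append, PySem.List.enumerate_cons,
      PySem.List.enumerate_nil, List.filter_append, hc]

lemma onesPos_len_aux (cs : List Char) (s : Int) :
    ((PySem.List.enumerate cs s).filter (fun p => p.2 == '1')).length
    = (cs.filter (fun c => c == '1')).length := by
  induction cs generalizing s with
  | nil => simp [PySem.List.enumerate_nil]
  | cons c t ih =>
    by_cases h : c == '1' <;>
      simp [PySem.List.enumerate_cons, List.filter_cons, h, ih]

lemma onesPos_length (cs : List Char) :
    (onesPos cs).length = (cs.filter (fun c => c == '1')).length := by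
  simp [onesPos, onesPos_len_aux]

lemma fold_range_eq {σ : Type} (cs : List Char) (a : Int) (ha : 0 ≤ a)
    (f : σ → Int → σ) (init : σ) :
    (PySem.List.pyRange a (cs.length : Int) 1).foldl
        (fun st i => if PySem.List.pyGetD cs i ' ' = '1' then f st i else st) init
    = ((onesPos cs).filter (fun p => decide (a ≤ p))).foldl f init := by
  induction cs using List.reverseRecOn with
  | nil =>
    rw [show ((([] : List Char).length : Nat) : Int) = 0 from rfl,
      PySem.List.pyRange_one_eq_nil ha]
    simp [onesPos, PySem.List.enumerate_nil]
  | append_singleton cs c ih =>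
    have hlen : (((cs ++ [c]).length : Nat) : Int) = (cs.length : Int) + 1 := by
      simp
    rw [hlen, onesPos_append, List.filter_append, List.foldl_append]
    by_cases hca : a ≤ (cs.length : Int)
    · rw [PySem.List.pyRange_one_succ_right hca, List.foldl_append]
      have hstep : ∀ (st : σ) (i : Int), i ∈ PySem.List.pyRange a (cs.length : Int) 1 →
          (if PySem.List.pyGetD (cs ++ [c]) i ' ' = '1' then f st i else st)
          = (if PySem.List.pyGetD cs i ' ' = '1' then f st i else st) := by
        intro st i hi
        rw [PySem.List.mem_pyRange_one] at hi
        have h0 : 0 ≤ i := le_trans ha hi.1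
        lift i to Nat using h0 with k
        have hk : k < cs.length := by exact_mod_cast hi.2
        rw [PySem.List.pyGetD_natCast, PySem.List.pyGetD_natCast,
          List.getD_eq_getElem?_getD, List.getD_eq_getElem?_getD,
          List.getElem?_append_left hk]
      have hinner : (PySem.List.pyRange a (cs.length : Int) 1).foldl
          (fun st i => if PySem.List.pyGetD (cs ++ [c]) i ' ' = '1' then f st i else st) init
          = (PySem.List.pyRange a (cs.length : Int) 1).foldl
          (fun st i => if PySem.List.pyGetD cs i ' ' = '1' then f st i else st) init :=
        PySem.List.foldl_congr_mem _ _ _ _ hstep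
      rw [hinner, ih]
      have hgc : PySem.List.pyGetD (cs ++ [c]) ((cs.length : Nat) : Int) ' ' = c := by
        rw [PySem.List.pyGetD_natCast, List.getD_eq_getElem?_getD]
        simp
      by_cases hc : c = '1'
      · simp [hc, hgc, hca]
      · have hcb : (c == '1') = false := by simp [hc]
        simp [hcb, hgc, hc]
    · have hlt : (cs.length : Int) < a := lt_of_not_ge hca
      rw [PySem.List.pyRange_one_eq_nil (by omega)]
      have h1 : (onesPos cs).filter (fun p => decide (a ≤ p)) = [] := by
        rw [List.filter_eq_nil_iff]
        intro p hp
        have hb := (onesPos_bounds cs p hp).2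
        simp
        omega
      have h2 : ((if c == '1' then [((cs.length : Nat) : Int)] else []).filter
          (fun p => decide (a ≤ p))) = [] := by
        by_cases hc : c == '1' <;> simp [hc] <;> omega
      rw [h1, h2]
      rfl

lemma mem_onesPos_of (cs : List Char) (k : Nat) (hk : k < cs.length)
    (h1 : cs[k] = '1') : ((k : Nat) : Int) ∈ onesPos cs := by
  refine List.mem_map.2 ⟨((0 : Int) + (k : Nat), cs[k]), List.mem_filter.2 ⟨?_, ?_⟩, by simp⟩
  · exact (PySem.List.mem_enumerate_iff _ _ _).2 ⟨k, hk, rfl⟩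
  · simp [h1]

lemma one_prefix_drop (cs : List Char) (k : Nat) (hk : k < cs.length) :
    (['1'] <+: cs.drop k) ↔ cs[k] = '1' := by
  rw [List.drop_eq_getElem_cons hk, List.cons_prefix_cons]
  simp [eq_comm]

lemma find_eq_head (cs : List Char) (p0 : Int) (rest : List Int)
    (h : onesPos cs = p0 :: rest) : PySem.Chars.find cs ['1'] = p0 := by
  have hp0mem : p0 ∈ onesPos cs := by rw [h]; exact List.mem_cons_self
  obtain ⟨hp0nonneg, hp0lt⟩ := onesPos_bounds cs p0 hp0mem
  have hchar := onesPos_char cs p0 hp0mem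
  lift p0 to Nat using hp0nonneg with k0
  have hk0 : k0 < cs.length := by exact_mod_cast hp0lt
  have hck0 : cs[k0] = '1' := by
    rw [PySem.List.pyGetD_natCast, List.getD_eq_getElem?_getD,
      List.getElem?_eq_getElem hk0] at hchar
    simpa using hchar
  have hmem1 : '1' ∈ cs := by rw [← hck0]; exact List.getElem_mem hk0
  have hinf : ['1'] <:+: cs := by
    obtain ⟨s, t, hst⟩ := List.append_of_mem hmem1
    exact ⟨s, t, by rw [hst]; simp⟩
  have hfind0 : 0 ≤ PySem.Chars.find cs ['1'] := (PySem.Chars.find_nonneg_iff cs ['1']).2 hinf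
  obtain ⟨hpre, hmin⟩ := PySem.Chars.find_spec hfind0
  have htlt : (PySem.Chars.find cs ['1']).toNat < cs.length := by
    by_contra hge
    push_neg at hge
    rw [List.drop_eq_nil_of_le hge] at hpre
    exact absurd (List.prefix_nil.mp hpre) (by simp)
  have hct : cs[(PySem.Chars.find cs ['1']).toNat] = '1' :=
    (one_prefix_drop cs _ htlt).1 hpre
  have htmem := mem_onesPos_of cs _ htlt hct
  rw [h] at htmem
  have hpair := onesPos_pairwise cs
  rw [h] at hpair
  have hallrest : ∀ r ∈ rest, (k0 : Int) < r := (List.pairwise_cons.1 hpair).1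
  rcases List.mem_cons.1 htmem with heq | hmemr
  · omega
  · exfalso
    have hklt : (k0 : Int) < ((PySem.Chars.find cs ['1']).toNat : Int) := hallrest _ hmemr
    exact hmin k0 (by omega) ((one_prefix_drop cs k0 hk0).2 hck0)

lemma filter_tail (p0 : Int) (rest : List Int) (hp : (p0 :: rest).Pairwise (· < ·)) :
    (p0 :: rest).filter (fun p => decide (p0 + 1 ≤ p)) = rest := by
  have hall : ∀ r ∈ rest, p0 < r := (List.pairwise_cons.1 hp).1
  rw [List.filter_cons]
  have hno : (decide (p0 + 1 ≤ p0)) = false := by simp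
  rw [hno]
  simp only [Bool.false_eq_true, if_false]
  rw [List.filter_eq_self]
  intro r hr
  have := hall r hr
  simp
  omega

lemma runMax_cons (a b : Int) (prs : List (Int × Int)) (m : Int) (w : Option (Int × Int)) :
    runMax ((a, b) :: prs) m w
    = if m < b - a then runMax prs (b - a) (some (a, b)) else runMax prs m w := by
  by_cases hc : m < b - a <;> simp [runMax, gapOf, hc]

lemma runMin_cons (a b : Int) (prs : List (Int × Int)) (m : Int) (w : Option (Int × Int)) :
    runMin ((a, b) :: prs) m w
    = if m > b - a then runMin prs (b - a) (some (a, b)) else runMin prs m w := by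
  by_cases hc : m > b - a <;> simp [runMin, gapOf, hc]

lemma chain_eq (rest : List Int) (p maxd mind : Int)
    (mx mn : Option (Int × Int)) :
    rest.foldl stepCore (p, maxd, mind, mx, mn)
    = (rest.getLastD p,
       (runMax ((p :: rest).zip rest) maxd mx).1,
       (runMin ((p :: rest).zip rest) mind mn).1,
       (runMax ((p :: rest).zip rest) maxd mx).2,
       (runMin ((p :: rest).zip rest) mind mn).2) := by
  induction rest generalizing p maxd mind mx mn with
  | nil => simp [runMax, runMin]
  | cons r t ih =>
    rw [List.foldl_cons, List.zip_cons_cons, List.getLastD_cons,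
      runMax_cons, runMin_cons]
    have hstep : stepCore (p, maxd, mind, mx, mn) r
        = (r, (if maxd < r - p then ((r - p : Int), (some (p, r) : Option (Int × Int))) else (maxd, mx)).1,
           (if mind > r - p then ((r - p : Int), (some (p, r) : Option (Int × Int))) else (mind, mn)).1,
           (if maxd < r - p then ((r - p : Int), (some (p, r) : Option (Int × Int))) else (maxd, mx)).2,
           (if mind > r - p then ((r - p : Int), (some (p, r) : Option (Int × Int))) else (mind, mn)).2) := by
      by_cases h1 : maxd < r - p <;> by_cases h2 : mind > r - p <;>
        simp [stepCore, h1, h2]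
    rw [hstep]
    by_cases h1 : maxd < r - p <;> by_cases h2 : mind > r - p <;>
      simp only [h1, h2, if_true, if_false, ite_true, ite_false] <;>
      exact ih _ _ _ _ _

lemma runMax_general (prs : List (Int × Int)) (m : Int) (w : Option (Int × Int)) :
    runMax prs m w
    = ((prs.map gapOf).foldl max m,
       if m < (prs.map gapOf).foldl max m
       then prs.find? (fun pr => gapOf pr == (prs.map gapOf).foldl max m)
       else w) := by
  induction prs generalizing m w with
  | nil => simp [runMax]
  | cons pr t ih =>
    obtain ⟨pa, pb⟩ := pr
    rw [runMax_cons, List.map_cons, List.foldl_cons,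
      show gapOf (pa, pb) = pb - pa from rfl]
    by_cases h1 : m < pb - pa
    · rw [if_pos h1, ih, max_eq_right h1.le]
      have hle : pb - pa ≤ (t.map gapOf).foldl max (pb - pa) :=
        (PySem.List.le_foldl_max _ _).1
      rw [if_pos (lt_of_lt_of_le h1 hle)]
      by_cases he : pb - pa = (t.map gapOf).foldl max (pb - pa)
      · have ht : (fun pr : Int × Int => gapOf pr == (t.map gapOf).foldl max (pb - pa)) (pa, pb) = true := by
          show ((pb - pa) == (t.map gapOf).foldl max (pb - pa)) = true
          exact beq_iff_eq.mpr he
        have hfind : List.find? (fun pr : Int × Int => gapOf pr == (t.map gapOf).foldl max (pb - pa)) ((pa, pb) :: t) = some (pa, pb) :=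
          List.find?_cons_of_pos ht
        rw [if_neg (by omega), hfind]
      · have hf : ¬ ((fun pr : Int × Int => gapOf pr == (t.map gapOf).foldl max (pb - pa)) (pa, pb) = true) := by
          show ¬ (((pb - pa) == (t.map gapOf).foldl max (pb - pa)) = true)
          simp only [beq_iff_eq]
          exact he
        have hfind : List.find? (fun pr : Int × Int => gapOf pr == (t.map gapOf).foldl max (pb - pa)) ((pa, pb) :: t) = List.find? (fun pr : Int × Int => gapOf pr == (t.map gapOf).foldl max (pb - pa)) t :=
          List.find?_cons_of_neg hf
        rw [if_pos (lt_of_le_of_ne hle he), hfind]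
    · rw [if_neg h1, ih, max_eq_left (not_lt.mp h1)]
      have hle : pb - pa ≤ m := not_lt.mp h1
      by_cases hmF : m < (t.map gapOf).foldl max m
      · have hf : ¬ ((fun pr : Int × Int => gapOf pr == (t.map gapOf).foldl max m) (pa, pb) = true) := by
          show ¬ (((pb - pa) == (t.map gapOf).foldl max m) = true)
          simp only [beq_iff_eq]
          omega
        have hfind : List.find? (fun pr : Int × Int => gapOf pr == (t.map gapOf).foldl max m) ((pa, pb) :: t) = List.find? (fun pr : Int × Int => gapOf pr == (t.map gapOf).foldl max m) t :=
          List.find?_cons_of_neg hf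
        rw [if_pos hmF, if_pos hmF, hfind]
      · rw [if_neg hmF, if_neg hmF]

lemma foldl_min_init_le (l : List Int) (m : Int) : l.foldl min m ≤ m := by
  induction l generalizing m with
  | nil => simp
  | cons a t ih => exact le_trans (ih (min m a)) (min_le_left _ _)

lemma runMin_general (prs : List (Int × Int)) (m : Int) (w : Option (Int × Int)) :
    runMin prs m w
    = ((prs.map gapOf).foldl min m,
       if m > (prs.map gapOf).foldl min m
       then prs.find? (fun pr => gapOf pr == (prs.map gapOf).foldl min m)
       else w) := by
  induction prs generalizing m w with
  | nil => simp [runMin]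
  | cons pr t ih =>
    obtain ⟨pa, pb⟩ := pr
    rw [runMin_cons, List.map_cons, List.foldl_cons,
      show gapOf (pa, pb) = pb - pa from rfl]
    by_cases h1 : m > pb - pa
    · rw [if_pos h1, ih, min_eq_right (le_of_lt h1)]
      have hle : (t.map gapOf).foldl min (pb - pa) ≤ pb - pa :=
        foldl_min_init_le _ _
      rw [if_pos (lt_of_le_of_lt hle h1)]
      by_cases he : pb - pa = (t.map gapOf).foldl min (pb - pa)
      · have ht : (fun pr : Int × Int => gapOf pr == (t.map gapOf).foldl min (pb - pa)) (pa, pb) = true := by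
          show ((pb - pa) == (t.map gapOf).foldl min (pb - pa)) = true
          exact beq_iff_eq.mpr he
        have hfind : List.find? (fun pr : Int × Int => gapOf pr == (t.map gapOf).foldl min (pb - pa)) ((pa, pb) :: t) = some (pa, pb) :=
          List.find?_cons_of_pos ht
        rw [if_neg (by omega), hfind]
      · have hf : ¬ ((fun pr : Int × Int => gapOf pr == (t.map gapOf).foldl min (pb - pa)) (pa, pb) = true) := by
          show ¬ (((pb - pa) == (t.map gapOf).foldl min (pb - pa)) = true)
          simp only [beq_iff_eq]
          exact he
        have hfind : List.find? (fun pr : Int × Int => gapOf pr == (t.map gapOf).foldl min (pb - pa)) ((pa, pb) :: t) = List.find? (fun pr : Int × Int => gapOf pr == (t.map gapOf).foldl min (pb - pa)) t :=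
          List.find?_cons_of_neg hf
        rw [if_pos (lt_of_le_of_ne hle (fun hh => he hh.symm)), hfind]
    · rw [if_neg h1, ih, min_eq_left (not_lt.mp h1)]
      have hle : m ≤ pb - pa := not_lt.mp h1
      by_cases hmF : m > (t.map gapOf).foldl min m
      · have hf : ¬ ((fun pr : Int × Int => gapOf pr == (t.map gapOf).foldl min m) (pa, pb) = true) := by
          show ¬ (((pb - pa) == (t.map gapOf).foldl min m) = true)
          simp only [beq_iff_eq]
          omega
        have hfind : List.find? (fun pr : Int × Int => gapOf pr == (t.map gapOf).foldl min m) ((pa, pb) :: t) = List.find? (fun pr : Int × Int => gapOf pr == (t.map gapOf).foldl min m) t :=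
          List.find?_cons_of_neg hf
        rw [if_pos hmF, if_pos hmF, hfind]
      · rw [if_neg hmF, if_neg hmF]

lemma find?_eq_index? (prs : List (Int × Int)) (M : Int) :
    prs.find? (fun pr => gapOf pr == M)
    = match PySem.List.index? (prs.map gapOf) M with
      | some j => prs[j]?
      | none => none := by
  induction prs with
  | nil =>
    have h0 : PySem.List.index? (([] : List (Int × Int)).map gapOf) M = none :=
      (PySem.List.index?_eq_none_iff _ _).2 (by simp)
    rw [h0]
    simp
  | cons pr t ih =>
    by_cases h : gapOf pr = M
    · have hidx : PySem.List.index? ((pr :: t).map gapOf) M = some 0 := by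
        rw [List.map_cons, h]
        exact PySem.List.index?_cons_self _ _
      rw [hidx, List.find?_cons_of_pos (by simp [h])]
      rfl
    · have hidx : PySem.List.index? ((pr :: t).map gapOf) M
          = (PySem.List.index? (t.map gapOf) M).map (· + 1) := by
        rw [List.map_cons]
        exact PySem.List.index?_cons_of_ne _ h
      rw [hidx, List.find?_cons_of_neg (by simp [h]), ih]
      cases hidx2 : PySem.List.index? (t.map gapOf) M with
      | none => simp
      | some j => simp

lemma zip_adj_lt (l : List Int) (hp : l.Pairwise (· < ·)) :
    ∀ pr ∈ l.zip l.tail, pr.1 < pr.2 := by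
  induction l with
  | nil => simp
  | cons x rest ih =>
    cases rest with
    | nil => simp
    | cons y t =>
      intro pr hpr
      rw [List.tail_cons, List.zip_cons_cons] at hpr
      rcases List.mem_cons.1 hpr with rfl | hm
      · exact (List.pairwise_cons.1 hp).1 y (by simp)
      · exact ih (List.pairwise_cons.1 hp).2 pr (by rw [List.tail_cons]; exact hm)

-- ===== VERDICT (by name: the statement is the Claim_ definition above) =====
theorem find_two_minmaxdist_spec : Claim_equal_find_two_minmaxdist := by
  intro study_room flag _ hpre
  unfold Pre_find_two_minmaxdist at hpre
  unfold Spec_find_two_minmaxdist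
  have hlen2 : 2 ≤ (onesPos study_room.toList).length := by
    rw [onesPos_length]; exact hpre
  obtain ⟨p0, p1, rest', hP⟩ : ∃ p0 p1 rest',
      onesPos study_room.toList = p0 :: p1 :: rest' := by
    rcases hO : onesPos study_room.toList with _ | ⟨a, _ | ⟨b, l2⟩⟩
    · rw [hO] at hlen2; simp at hlen2
    · rw [hO] at hlen2; simp at hlen2
    · exact ⟨a, b, l2, rfl⟩
  have hpair := onesPos_pairwise study_room.toList
  rw [hP] at hpair
  have hp0 := onesPos_bounds study_room.toList p0 (by rw [hP]; simp)
  have hfind : PySem.Str.find study_room "1" = p0 := by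
    have h1 := find_eq_head study_room.toList p0 (p1 :: rest') hP
    have h2 : ("1" : String).toList = ['1'] := rfl
    simp [PySem.Str.find, h2]
    exact h1
  -- adjacent-pair facts
  have hadj : ∀ pr ∈ (p0 :: p1 :: rest').zip (p1 :: rest'), pr.1 < pr.2 := by
    intro pr hpr
    exact zip_adj_lt (p0 :: p1 :: rest') hpair pr hpr
  have hbounds : ∀ pr ∈ (p0 :: p1 :: rest').zip (p1 :: rest'),
      0 ≤ pr.1 ∧ pr.2 < (study_room.toList.length : Int) := by
    intro pr hpr
    obtain ⟨h1, h2⟩ := List.of_mem_zip hpr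
    refine ⟨(onesPos_bounds _ pr.1 (by rw [hP]; exact h1)).1, ?_⟩
    exact (onesPos_bounds _ pr.2 (by rw [hP]; exact List.mem_cons_of_mem _ h2)).2
  have hmemg0 : ((p0, p1) : Int × Int) ∈ (p0 :: p1 :: rest').zip (p1 :: rest') := by
    rw [List.zip_cons_cons]; exact List.mem_cons_self
  have hg0pos : 0 < p1 - p0 := by
    have h : p0 < p1 := hadj (p0, p1) hmemg0
    omega
  have hg0lt : p1 - p0 < (study_room.toList.length : Int) := by
    have hb := hbounds (p0, p1) hmemg0
    have hb1 : (0 : Int) ≤ p0 := hb.1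
    have hb2 : p1 < (study_room.toList.length : Int) := hb.2
    omega
  have hgaps_cons : ((p0 :: p1 :: rest').zip (p1 :: rest')).map gapOf
      = (p1 - p0) :: ((p1 :: rest').zip rest').map gapOf := by
    rw [List.zip_cons_cons, List.map_cons]
    rfl
  have hFge : p1 - p0 ≤ (((p1 :: rest').zip rest').map gapOf).foldl max (p1 - p0) :=
    (PySem.List.le_foldl_max _ _).1
  have hNle : (((p1 :: rest').zip rest').map gapOf).foldl min (p1 - p0) ≤ p1 - p0 :=
    foldl_min_init_le _ _
  -- evaluate the two scans
  have hRM : runMax ((p0 :: p1 :: rest').zip (p1 :: rest')) 0 none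
      = ((((p1 :: rest').zip rest').map gapOf).foldl max (p1 - p0),
         ((p0 :: p1 :: rest').zip (p1 :: rest')).find?
           (fun pr => gapOf pr == (((p1 :: rest').zip rest').map gapOf).foldl max (p1 - p0))) := by
    rw [runMax_general, hgaps_cons, List.foldl_cons, max_eq_right hg0pos.le,
      if_pos (by omega : (0 : Int) < (((p1 :: rest').zip rest').map gapOf).foldl max (p1 - p0))]
  have hRN : runMin ((p0 :: p1 :: rest').zip (p1 :: rest')) (study_room.toList.length : Int) none
      = ((((p1 :: rest').zip rest').map gapOf).foldl min (p1 - p0),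
         ((p0 :: p1 :: rest').zip (p1 :: rest')).find?
           (fun pr => gapOf pr == (((p1 :: rest').zip rest').map gapOf).foldl min (p1 - p0))) := by
    rw [runMin_general, hgaps_cons, List.foldl_cons, min_eq_right hg0lt.le,
      if_pos (by omega : (study_room.toList.length : Int) > (((p1 :: rest').zip rest').map gapOf).foldl min (p1 - p0))]
  have hmax? : PySem.List.max? (((p0 :: p1 :: rest').zip (p1 :: rest')).map gapOf) (fun g => g)
      = some ((((p1 :: rest').zip rest').map gapOf).foldl max (p1 - p0)) := by
    rw [hgaps_cons, PySem.List.max?_id_cons]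
  have hmin? : PySem.List.min? (((p0 :: p1 :: rest').zip (p1 :: rest')).map gapOf) (fun g => g)
      = some ((((p1 :: rest').zip rest').map gapOf).foldl min (p1 - p0)) := by
    rw [hgaps_cons, PySem.List.min?_id_cons]
  -- A's loop result
  have hAfold : ((p1 :: rest').foldl stepCore
        ((p0 : Int), (0 : Int), ((study_room.toList.length : Nat) : Int),
         (none : Option (Int × Int)), (none : Option (Int × Int))))
      = ((p1 :: rest').getLastD p0,
         (((p1 :: rest').zip rest').map gapOf).foldl max (p1 - p0),
         (((p1 :: rest').zip rest').map gapOf).foldl min (p1 - p0),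
         ((p0 :: p1 :: rest').zip (p1 :: rest')).find?
           (fun pr => gapOf pr == (((p1 :: rest').zip rest').map gapOf).foldl max (p1 - p0)),
         ((p0 :: p1 :: rest').zip (p1 :: rest')).find?
           (fun pr => gapOf pr == (((p1 :: rest').zip rest').map gapOf).foldl min (p1 - p0))) := by
    rw [chain_eq, hRM, hRN]
  -- unfold both ports and rewrite
  simp only [find_two_minmaxdist, find_two_minmaxdist_alt]
  rw [hfind]
  rw [show stepA study_room.toList
      = fun st i => if PySem.List.pyGetD study_room.toList i ' ' = '1' then stepCore st i else st
    from rfl]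
  rw [fold_range_eq study_room.toList (p0 + 1) (by omega) stepCore
      ((p0 : Int), (0 : Int), ((study_room.toList.length : Nat) : Int),
       (none : Option (Int × Int)), (none : Option (Int × Int)))]
  rw [hP, filter_tail p0 (p1 :: rest') hpair, hAfold]
  rw [show ((PySem.List.enumerate study_room.toList 0).filter (fun p => p.2 == '1')).map (·.1)
      = onesPos study_room.toList from rfl]
  rw [hP, PySem.List.slice_from_one, List.tail_cons]
  rw [show (fun pr : Int × Int => pr.2 - pr.1) = gapOf from rfl]
  rw [hmax?, hmin?]
  rw [find?_eq_index? ((p0 :: p1 :: rest').zip (p1 :: rest'))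
      ((((p1 :: rest').zip rest').map gapOf).foldl max (p1 - p0)),
    find?_eq_index? ((p0 :: p1 :: rest').zip (p1 :: rest'))
      ((((p1 :: rest').zip rest').map gapOf).foldl min (p1 - p0))]
  by_cases hflag : flag = "max"
  · simp only [hflag, if_true, ite_true]
    cases hidx : PySem.List.index? (((p0 :: p1 :: rest').zip (p1 :: rest')).map gapOf)
        ((((p1 :: rest').zip rest').map gapOf).foldl max (p1 - p0)) with
    | none => rfl
    | some j =>
      cases hpj : ((p0 :: p1 :: rest').zip (p1 :: rest'))[j]? with
      | none => rfl
      | some pr => obtain ⟨x, y⟩ := pr; rfl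
  · simp only [hflag, if_false, ite_false]
    cases hidx : PySem.List.index? (((p0 :: p1 :: rest').zip (p1 :: rest')).map gapOf)
        ((((p1 :: rest').zip rest').map gapOf).foldl min (p1 - p0)) with
    | none => rfl
    | some j =>
      cases hpj : ((p0 :: p1 :: rest').zip (p1 :: rest'))[j]? with
      | none => rfl
      | some pr => obtain ⟨x, y⟩ := pr; rfl
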